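-- pv_equiv track=rewrite | github.com/Delfictus/PRISM-LBS | staging_cleanup/legacy_directories/PRISM-AI-UNIFIED-VAULT/scripts/compliance_validator.py | compute_ledger_merkle
-- ===== SOURCE A (Python) =====
-- from typing import Dict, List, Optional, Sequence
--
-- def fnv1a64(value: str) -> int:
--     offset = 0xCBF29CE484222325
--     prime = 0x100000001B3
--     hash_val = offset
--     for byte in value.encode("utf-8"):
--         hash_val ^= byte
--         hash_val = (hash_val * prime) & 0xFFFFFFFFFFFFFFFF
--     return hash_val
--
-- def compute_ledger_merkle(entries: Sequence[Dict[str, object]]) -> str: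
--     if not entries:
--         return f"{fnv1a64('ledger-empty'):016x}"
--
--     leaves = []
--     for entry in entries:
--         node = entry.get("node_id", "")
--         anchor = entry.get("anchor_hash", "")
--         leaves.append(f"{fnv1a64(f'{node}:{anchor}'):016x}")
--     leaves.sort()
--
--     level = leaves
--     while len(level) > 1:
--         next_level: List[str] = []
--         for idx in range(0, len(level), 2):
--             left = level[idx]
--             right = level[idx + 1] if idx + 1 < len(level) else level[idx]
--             next_level.append(f"{fnv1a64(left + right):016x}")
--         level = next_level
--     return level[0]
-- ===== SOURCE B (Python) =====
-- from typing import Dict, List, Optional, Sequence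
--
--
-- def fnv1a64(value: str) -> int:
--     offset = 0xCBF29CE484222325
--     prime = 0x100000001B3
--     hash_val = offset
--     for byte in value.encode("utf-8"):
--         hash_val ^= byte
--         hash_val = (hash_val * prime) & 0xFFFFFFFFFFFFFFFF
--     return hash_val
--
--
-- def _combine(left: str, right: str) -> str:
--     return f"{fnv1a64(left + right):016x}"
--
--
-- def _next_level(level: List[str]) -> List[str]:
--     if len(level) >= 2:
--         return [_combine(level[0], level[1])] + _next_level(level[2:])
--     if len(level) == 1:
--         return [_combine(level[0], level[0])]
--     return []
--
--
-- def _reduce(level: List[str]) -> str: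
--     return level[0] if len(level) == 1 else _reduce(_next_level(level))
--
--
-- def compute_ledger_merkle(entries: Sequence[Dict[str, object]]) -> str:
--     if not entries:
--         return f"{fnv1a64('ledger-empty'):016x}"
--     leaves = sorted(
--         _combine(e.get("node_id", "") + ":", e.get("anchor_hash", ""))
--         for e in entries
--     )
--     return _reduce(leaves)
-- ===== Notes on version B (the rewrite author's own statement) =====
-- stated objective: alternative
-- what changed: The index-driven while-loop over levels (range(0,len,2) with bounds-checked level[idx+1]) is replaced by structural recursion: a pattern-matching _next_level that peels two leaves at a time (self-pairing a lone leaf) and a recursive _reduce down to the root; leaf hashing and sorting are kept.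
import Mathlib
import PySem

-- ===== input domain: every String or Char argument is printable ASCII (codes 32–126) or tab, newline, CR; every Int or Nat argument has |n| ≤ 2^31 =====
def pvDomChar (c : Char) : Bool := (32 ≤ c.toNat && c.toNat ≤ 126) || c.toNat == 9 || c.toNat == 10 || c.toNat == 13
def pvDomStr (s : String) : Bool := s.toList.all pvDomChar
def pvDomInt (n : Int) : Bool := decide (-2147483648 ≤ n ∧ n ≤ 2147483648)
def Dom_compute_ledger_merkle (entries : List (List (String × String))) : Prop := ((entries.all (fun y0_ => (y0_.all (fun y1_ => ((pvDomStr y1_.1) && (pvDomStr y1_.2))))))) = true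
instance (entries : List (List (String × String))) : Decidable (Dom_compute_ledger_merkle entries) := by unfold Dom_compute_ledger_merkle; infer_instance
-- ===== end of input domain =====

-- B replaces A's index-driven while-loop over levels by structural recursion (pair-peeling next level + recursive reduce); same leaves, sort and root.

-- Shared helpers (the Python module helper fnv1a64 and the f-string "%016x" formatting, used by both sources).
-- fnv1a64: exact for the ASCII domain (Dom), where UTF-8 bytes coincide with code points.
def fnv1a64 (s : String) : Nat :=
  s.toList.foldl (fun h c => ((h ^^^ c.toNat) * 0x100000001B3) % 18446744073709551616) 0xCBF29CE484222325

def hexDigit (n : Nat) : Char := if n < 10 then Char.ofNat (48 + n) else Char.ofNat (87 + n)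

-- f"{h:016x}" for h < 2^64: 16 zero-padded lowercase hex digits
def hex16 (n : Nat) : String := String.ofList ((List.range 16).map (fun i => hexDigit (n / 16 ^ (15 - i) % 16)))

-- ===== PORT A =====
def leafHashA (e : List (String × String)) : String :=
  hex16 (fnv1a64 (PySem.Dict.getD ⟨e⟩ "node_id" "" ++ ":" ++ PySem.Dict.getD ⟨e⟩ "anchor_hash" ""))

-- body of A's inner for-loop over range(0, len(level), 2)
def pairHashA (level : List String) (idx : Int) : String :=
  let left := PySem.List.pyGetD level idx ""
  let right := if idx + 1 < (level.length : Int) then PySem.List.pyGetD level (idx + 1) "" else left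
  hex16 (fnv1a64 (left ++ right))

def stepA (level : List String) : List String :=
  (PySem.List.pyRange 0 level.length 2).foldl (fun nl idx => nl ++ [pairHashA level idx]) []

theorem stepA_eq_map (level : List String) :
    stepA level = (List.range ((level.length + 1) / 2)).map (fun k => pairHashA level ((2 * k : Nat) : Int)) := by
  unfold stepA
  rw [PySem.List.pyRange_of_pos 0 (level.length : Int) (by norm_num : (0 : Int) < 2)]
  rw [List.foldl_map, PySem.List.foldl_append_singleton_eq_map]
  have hc : (if (0 : Int) < (level.length : Int) then (((level.length : Int) - 0 + 2 - 1) / 2).toNat else 0)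
      = (level.length + 1) / 2 := by split <;> omega
  rw [hc]
  apply List.map_congr_left
  intro k _
  norm_num

theorem length_stepA (level : List String) : (stepA level).length = (level.length + 1) / 2 := by
  rw [stepA_eq_map]; simp

def loopA (level : List String) : String :=
  if level.length > 1 then loopA (stepA level) else PySem.List.pyGetD level 0 ""
termination_by level.length
decreasing_by
  rw [length_stepA]; omega

def compute_ledger_merkle (entries : List (List (String × String))) : String :=
  if entries = [] then hex16 (fnv1a64 "ledger-empty")
  else
    let leaves := entries.foldl (fun acc e => acc ++ [leafHashA e]) []
    loopA (PySem.List.sorted leaves (fun x => x) false)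

-- ===== PORT B =====
def combineB (l r : String) : String := hex16 (fnv1a64 (l ++ r))

def nextLevelB : List String → List String
  | [] => []
  | [a] => [combineB a a]
  | a :: b :: rest => combineB a b :: nextLevelB rest

theorem length_nextLevelB (l : List String) : (nextLevelB l).length = (l.length + 1) / 2 := by
  match l with
  | [] => simp [nextLevelB]
  | [a] => simp [nextLevelB]
  | a :: b :: rest => simp [nextLevelB, length_nextLevelB rest]; omega

def reduceB : List String → String
  | [] => ""   -- unreachable (reduceB is only applied to nonempty lists); totality guard
  | [a] => a
  | a :: b :: rest => reduceB (nextLevelB (a :: b :: rest))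
termination_by l => l.length
decreasing_by
  rw [length_nextLevelB]; simp; omega

def compute_ledger_merkle_alt (entries : List (List (String × String))) : String :=
  match entries with
  | [] => hex16 (fnv1a64 "ledger-empty")
  | _ :: _ =>
    reduceB (PySem.List.sorted
      (entries.map (fun e =>
        combineB (PySem.Dict.getD ⟨e⟩ "node_id" "" ++ ":") (PySem.Dict.getD ⟨e⟩ "anchor_hash" "")))
      (fun x => x) false)

-- ===== PRECONDITION & SPEC =====
def Spec_compute_ledger_merkle (entries : List (List (String × String))) (out : String) : Prop := out = compute_ledger_merkle_alt entries
instance (entries : List (List (String × String))) (out : String) : Decidable (Spec_compute_ledger_merkle entries out) := by unfold Spec_compute_ledger_merkle; infer_instance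

-- ===== CLAIM (what is proved, stated in full; the proofs are below) =====
def Claim_equal_compute_ledger_merkle : Prop := ∀ (entries : List (List (String × String))), Dom_compute_ledger_merkle entries → Spec_compute_ledger_merkle entries (compute_ledger_merkle entries)

-- ===== LEMMAS AND PROOFS =====

theorem getD_cons_cons_add_two (zs : List String) (a b d : String) (m : Nat) :
    (a :: b :: zs).getD (m + 2) d = zs.getD m d := rfl

theorem pairHashA_shift (x y : String) (rest : List String) (k : Nat) :
    pairHashA (x :: y :: rest) ((2 * k : Nat) + 2) = pairHashA rest (2 * k : Nat) := by
  have e4 : ((2 * k : Nat) : Int) + 1 = ((2 * k + 1 : Nat) : Int) := by push_cast; ring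
  have hL : PySem.List.pyGetD (x :: y :: rest) (((2 * k : Nat) : Int) + 2) "" = rest.getD (2 * k) "" := by
    have e2 : ((2 * k : Nat) : Int) + 2 = ((2 * k + 2 : Nat) : Int) := by push_cast; ring
    rw [e2, PySem.List.pyGetD_natCast, getD_cons_cons_add_two]
  have hR : PySem.List.pyGetD (x :: y :: rest) (((2 * k : Nat) : Int) + 2 + 1) "" = rest.getD (2 * k + 1) "" := by
    have e3 : ((2 * k : Nat) : Int) + 2 + 1 = ((2 * k + 1 + 2 : Nat) : Int) := by push_cast; ring
    rw [e3, PySem.List.pyGetD_natCast, getD_cons_cons_add_two]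
  have hc : (((2 * k : Nat) : Int) + 2 + 1 < ((x :: y :: rest).length : Int))
      = (((2 * k + 1 : Nat) : Int) < (rest.length : Int)) := by
    simp only [List.length_cons]; push_cast
    apply propext; omega
  simp only [pairHashA, hL, hR, hc, e4, PySem.List.pyGetD_natCast]

theorem stepA_eq_nextLevelB (l : List String) : stepA l = nextLevelB l := by
  match l with
  | [] => rfl
  | [a] =>
    rw [stepA_eq_map]
    simp only [List.length_cons, List.length_nil]
    norm_num [List.range_one, nextLevelB, pairHashA, combineB, PySem.List.pyGetD_natCast]
  | x :: y :: rest =>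
    rw [stepA_eq_map]
    have hm : ((x :: y :: rest).length + 1) / 2 = (rest.length + 1) / 2 + 1 := by
      simp only [List.length_cons]; omega
    rw [hm, List.range_succ_eq_map, List.map_cons, List.map_map]
    have h0 : pairHashA (x :: y :: rest) ((2 * 0 : Nat) : Int) = combineB x y := by
      norm_num [pairHashA, combineB, PySem.List.pyGetD_natCast, PySem.List.pyGetD_ofNat']
    have hmap : (List.range ((rest.length + 1) / 2)).map
          ((fun k => pairHashA (x :: y :: rest) ((2 * k : Nat) : Int)) ∘ Nat.succ)
        = (List.range ((rest.length + 1) / 2)).map (fun k => pairHashA rest ((2 * k : Nat) : Int)) := by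
      apply List.map_congr_left
      intro k _
      show pairHashA (x :: y :: rest) ((2 * (k + 1) : Nat) : Int) = _
      have : ((2 * (k + 1) : Nat) : Int) = ((2 * k : Nat) : Int) + 2 := by push_cast; ring
      rw [this, pairHashA_shift]
    rw [h0, hmap, ← stepA_eq_map, stepA_eq_nextLevelB rest]
    rfl

theorem nextLevelB_ne_nil (a b : String) (rest : List String) :
    nextLevelB (a :: b :: rest) ≠ [] := by
  apply List.ne_nil_of_length_pos
  rw [length_nextLevelB]
  simp only [List.length_cons]
  omega

theorem loopA_eq_reduceB (l : List String) (h : l ≠ []) : loopA l = reduceB l := by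
  match l with
  | [a] =>
    rw [loopA]
    norm_num [reduceB, PySem.List.pyGetD_natCast]
  | a :: b :: rest =>
    rw [loopA]
    have hlen : (a :: b :: rest).length > 1 := by simp
    rw [if_pos hlen, stepA_eq_nextLevelB,
        loopA_eq_reduceB (nextLevelB (a :: b :: rest)) (nextLevelB_ne_nil a b rest)]
    conv_rhs => rw [reduceB]
termination_by l.length
decreasing_by
  simp only [length_nextLevelB, List.length_cons]; omega

theorem leafHashA_eq (e : List (String × String)) :
    leafHashA e = combineB (PySem.Dict.getD ⟨e⟩ "node_id" "" ++ ":") (PySem.Dict.getD ⟨e⟩ "anchor_hash" "") := by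
  simp [leafHashA, combineB, String.append_assoc]

-- ===== VERDICT (by name: the statement is the Claim_ definition above) =====
theorem compute_ledger_merkle_spec : Claim_equal_compute_ledger_merkle := by
  intro entries _
  unfold Spec_compute_ledger_merkle
  match entries with
  | [] => rfl
  | e :: es =>
    show compute_ledger_merkle (e :: es) = compute_ledger_merkle_alt (e :: es)
    unfold compute_ledger_merkle compute_ledger_merkle_alt
    rw [if_neg (List.cons_ne_nil e es)]
    rw [PySem.List.foldl_append_singleton_eq_map, List.nil_append]
    have hmap : (e :: es).map leafHashA = (e :: es).map (fun e =>
        combineB (PySem.Dict.getD ⟨e⟩ "node_id" "" ++ ":") (PySem.Dict.getD ⟨e⟩ "anchor_hash" "")) :=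
      List.map_congr_left (fun x _ => leafHashA_eq x)
    rw [hmap]
    apply loopA_eq_reduceB
    apply List.ne_nil_of_length_pos
    rw [PySem.List.length_sorted]
    simp
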